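-- pv_equiv track=rewrite | github.com/AvorNika/BeginnerCourse | 14.1(5).py | get_shipping_cost
-- ===== SOURCE A (Python) =====
-- def get_shipping_cost(quantity):
--     cost = 1000
--     if quantity == 1:
--         return cost
--     if quantity > 1:
--         for i in range(quantity - 1):
--             cost += 120
--     return cost
-- ===== SOURCE B (Python) =====
-- def get_shipping_cost(quantity):
--     return 1000 + 120 * max(quantity - 1, 0)
-- ===== Notes on version B (the rewrite author's own statement) =====
-- stated objective: faster
-- what changed: Replaced the per-unit accumulation loop with a closed-form expression: base cost plus the per-extra-unit fee times the number of extra units (clamped at zero).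
import Mathlib
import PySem

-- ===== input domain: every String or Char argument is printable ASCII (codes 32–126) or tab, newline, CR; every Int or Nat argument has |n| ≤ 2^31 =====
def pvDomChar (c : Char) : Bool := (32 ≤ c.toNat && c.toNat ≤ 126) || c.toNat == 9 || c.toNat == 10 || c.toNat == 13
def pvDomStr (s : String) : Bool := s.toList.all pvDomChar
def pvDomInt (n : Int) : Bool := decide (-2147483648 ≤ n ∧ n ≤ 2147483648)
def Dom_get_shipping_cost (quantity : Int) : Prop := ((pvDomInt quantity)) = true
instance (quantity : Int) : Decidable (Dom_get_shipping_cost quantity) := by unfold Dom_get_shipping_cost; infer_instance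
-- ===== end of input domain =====

-- B replaces A's per-unit accumulation loop with the closed form 1000 + 120*max(quantity-1, 0) (faster).


-- ===== PORT A =====
def get_shipping_cost (quantity : Int) : Int :=
  let cost : Int := 1000
  if quantity = 1 then cost
  else if quantity > 1 then
    (PySem.List.pyRange 0 (quantity - 1) 1).foldl (fun c _ => c + 120) cost
  else cost

-- ===== PORT B =====
def get_shipping_cost_alt (quantity : Int) : Int :=
  1000 + 120 * max (quantity - 1) 0

-- ===== PRECONDITION & SPEC =====
def Spec_get_shipping_cost (quantity : Int) (out : Int) : Prop := out = get_shipping_cost_alt quantity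
instance (quantity : Int) (out : Int) : Decidable (Spec_get_shipping_cost quantity out) := by unfold Spec_get_shipping_cost; infer_instance

-- ===== CLAIM (what is proved, stated in full; the proofs are below) =====
def Claim_equal_get_shipping_cost : Prop := ∀ (quantity : Int), Dom_get_shipping_cost quantity → Spec_get_shipping_cost quantity (get_shipping_cost quantity)

-- ===== LEMMAS AND PROOFS =====
theorem foldl_add120 (l : List Int) (c : Int) :
    l.foldl (fun c _ => c + 120) c = c + 120 * l.length := by
  induction l generalizing c with
  | nil => simp
  | cons x xs ih => simp [List.foldl, ih]; ring

-- ===== VERDICT (by name: the statement is the Claim_ definition above) =====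
theorem get_shipping_cost_spec : Claim_equal_get_shipping_cost := by
  intro q _
  unfold Spec_get_shipping_cost get_shipping_cost get_shipping_cost_alt
  by_cases h1 : q = 1
  · simp [h1]
  · simp only [if_neg h1]
    by_cases h2 : q > 1
    · simp only [if_pos h2, foldl_add120, PySem.List.length_pyRange_one]
      have : ((q - 1 - 0).toNat : Int) = q - 1 := by omega
      rw [this, max_eq_left (by omega : (0:Int) ≤ q - 1)]
    · simp only [if_neg h2]
      rw [max_eq_right (by omega : q - 1 ≤ (0:Int))]
      ring
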